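-- pv_equiv track=rewrite | github.com/prouch4/Practices | CodeSignal/str_arr2.py | solution
-- ===== SOURCE A (Python) =====
-- def solution(inputString, numbers):
--     vowels = 'aeiou'
--     consonants = 'bcdfghjklmnpqrstvwxyz'
--     # TODO: implement the solution based on the provided task description
--     new_string = ''
--     sum_num = 0
--     i = 0
--
--     while i < len(inputString) and sum_num <= 100 and i < len(numbers):
--         char = inputString[i]
--         if char in vowels:
--             # Encontramos el índice de la vocal actual
--             idx = vowels.index(char)
--             # Tomamos la vocal siguiente (o la primera si es la última)
--             new_string += vowels[idx + 1] if idx < len(vowels) - 1 else vowels[0]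
--         elif char in consonants:
--             # Encontramos el índice de la consonante actual
--             idx = consonants.index(char)
--             # Tomamos la consonante siguiente (o la primera si es la última)
--             new_string += consonants[idx + 1] if idx < len(consonants) - 1 else consonants[0]
--         sum_num += numbers[i] * 3
--         i += 1
--
--     return new_string, numbers[i:]
-- ===== SOURCE B (Python) =====
-- def solution(inputString, numbers):
--     src = 'aeiou' + 'bcdfghjklmnpqrstvwxyz'
--     dst = 'eioua' + 'cdfghjklmnpqrstvwxyzb'
--     table = str.maketrans(src, dst)
--     stop = min(len(inputString), len(numbers))
--     i = 0
--     sum_num = 0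
--     while i < stop and sum_num <= 100:
--         sum_num += numbers[i] * 3
--         i += 1
--     shifted = ''.join(c for c in inputString[:i] if c in src).translate(table)
--     return shifted, numbers[i:]
-- ===== Notes on version B (the rewrite author's own statement) =====
-- stated objective: idiomatic
-- what changed: B first finds the stop index with a plain summing loop, then produces the output by a single filter-and-translate over the prefix via a precomputed vowel/consonant translation table, instead of A's per-character index/in branching with string concatenation inside the loop.
import Mathlib
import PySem

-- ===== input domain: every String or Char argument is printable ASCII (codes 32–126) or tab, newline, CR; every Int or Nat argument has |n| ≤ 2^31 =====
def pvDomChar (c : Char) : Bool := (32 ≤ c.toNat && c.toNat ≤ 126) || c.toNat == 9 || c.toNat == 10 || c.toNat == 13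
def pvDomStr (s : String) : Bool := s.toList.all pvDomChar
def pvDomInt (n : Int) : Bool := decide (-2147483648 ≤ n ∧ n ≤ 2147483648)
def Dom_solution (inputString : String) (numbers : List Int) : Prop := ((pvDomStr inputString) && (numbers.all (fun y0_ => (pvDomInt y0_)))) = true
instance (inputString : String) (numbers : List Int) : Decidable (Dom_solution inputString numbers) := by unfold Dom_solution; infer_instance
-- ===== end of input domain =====

-- B replaces A's per-character index/in branching inside the summing loop by a precomputed
-- translation table applied once to the prefix, after a plain loop finds the stop index (idiomatic).


-- ===== PORT A =====
def pvVowels : List Char := ['a','e','i','o','u']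
def pvConsonants : List Char := ['b','c','d','f','g','h','j','k','l','m','n','p','q','r','s','t','v','w','x','y','z']

-- one iteration's character contribution: A's if/elif with `.index` and the next-or-first pick
def pvShiftA (c : Char) : String :=
  if c ∈ pvVowels then
    let idx := (PySem.List.index? pvVowels c).getD 0
    if idx < pvVowels.length - 1 then String.ofList [pvVowels.getD (idx + 1) 'a']
    else String.ofList [pvVowels.getD 0 'a']
  else if c ∈ pvConsonants then
    let idx := (PySem.List.index? pvConsonants c).getD 0
    if idx < pvConsonants.length - 1 then String.ofList [pvConsonants.getD (idx + 1) 'a']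
    else String.ofList [pvConsonants.getD 0 'a']
  else ""

-- A's while loop: state (new_string, sum_num); advancing i = consuming one char and one number;
-- the returned list is numbers[i:]
def pvLoopA : List Char → List Int → Int → String → String × List Int
  | c :: cs, n :: ns, sum, acc =>
    if sum ≤ 100 then pvLoopA cs ns (sum + n * 3) (acc ++ pvShiftA c)
    else (acc, n :: ns)
  | _, ns, _, acc => (acc, ns)

def solution (inputString : String) (numbers : List Int) : String × List Int :=
  pvLoopA inputString.toList numbers 0 ""

-- ===== PORT B =====
def pvSrc : List Char := pvVowels ++ pvConsonants
def pvDst : List Char := ['e','i','o','u','a'] ++ ['c','d','f','g','h','j','k','l','m','n','p','q','r','s','t','v','w','x','y','z','b']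

-- the maketrans table lookup: position in src, same position in dst
def pvTr (c : Char) : Char := pvDst.getD ((PySem.List.index? pvSrc c).getD 0) c

-- B's while loop over numbers[:stop]: returns the stop index i
def pvStopB : List Int → Int → Nat
  | [], _ => 0
  | n :: ns, sum => if sum ≤ 100 then pvStopB ns (sum + n * 3) + 1 else 0

def solution_alt (inputString : String) (numbers : List Int) : String × List Int :=
  let s := inputString.toList
  let i := pvStopB (numbers.take (min s.length numbers.length)) 0
  (String.ofList (((s.take i).filter (· ∈ pvSrc)).map pvTr), numbers.drop i)

-- ===== PRECONDITION & SPEC =====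
def Spec_solution (inputString : String) (numbers : List Int) (out : String × List Int) : Prop := out = solution_alt inputString numbers
instance (inputString : String) (numbers : List Int) (out : String × List Int) : Decidable (Spec_solution inputString numbers out) := by unfold Spec_solution; infer_instance

-- ===== CLAIM (what is proved, stated in full; the proofs are below) =====
def Claim_equal_solution : Prop := ∀ (inputString : String) (numbers : List Int), Dom_solution inputString numbers → Spec_solution inputString numbers (solution inputString numbers)

-- ===== LEMMAS AND PROOFS =====

-- per-character agreement: A's branchy shift is B's filter-then-translate of one char
lemma pvShiftA_eq (c : Char) :
    pvShiftA c = String.ofList (if c ∈ pvSrc then [pvTr c] else []) := by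
  by_cases h : c ∈ pvSrc
  · simp only [if_pos h]
    fin_cases h <;> decide
  · have hv : c ∉ pvVowels := fun hc => h (by simp [pvSrc, hc])
    have hc' : c ∉ pvConsonants := fun hc => h (by simp [pvSrc, hc])
    simp [pvShiftA, hv, hc', h]

lemma pvLoopA_eq (cs : List Char) :
    ∀ (ns : List Int) (sum : Int) (acc : String),
    pvLoopA cs ns sum acc =
      (acc ++ String.ofList (((cs.take (pvStopB (ns.take (min cs.length ns.length)) sum)).filter
          (· ∈ pvSrc)).map pvTr),
       ns.drop (pvStopB (ns.take (min cs.length ns.length)) sum)) := by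
  induction cs with
  | nil =>
    intro ns sum acc
    simp [pvLoopA, pvStopB]
  | cons c cs ih =>
    intro ns sum acc
    cases ns with
    | nil => simp [pvLoopA, pvStopB]
    | cons n ns =>
      have hmin : min (c :: cs).length (n :: ns).length = min cs.length ns.length + 1 := by
        simp [Nat.succ_min_succ]
      rw [hmin]
      simp only [List.take_succ_cons, pvStopB]
      by_cases hs : sum ≤ 100
      · rw [if_pos hs]
        show pvLoopA (c :: cs) (n :: ns) sum acc = _
        rw [pvLoopA, if_pos hs, ih ns (sum + n * 3) (acc ++ pvShiftA c)]
        rw [pvShiftA_eq]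
        by_cases hc : c ∈ pvSrc <;>
          simp [hc, List.take_succ_cons, String.append_assoc, ← String.ofList_append]
      · rw [if_neg hs]
        show pvLoopA (c :: cs) (n :: ns) sum acc = _
        rw [pvLoopA, if_neg hs]
        simp

-- ===== VERDICT (by name: the statement is the Claim_ definition above) =====
theorem solution_spec : Claim_equal_solution := by
  intro inputString numbers _
  show solution inputString numbers = solution_alt inputString numbers
  unfold solution solution_alt
  rw [pvLoopA_eq]
  simp
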